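-- pv_equiv track=rewrite | github.com/trzmielewskiR/schedulingAlgorithms | 11/first.py | BestNeighbor
-- ===== SOURCE A (Python) =====
-- def calculate_total_processing_time(num_machines, num_jobs, processing_times, order):
--     completion_times = [0] * num_machines
--
--     for job_id in order:
--         job_processing_times = processing_times[job_id - 1]
--         for j in range(num_machines):
--             if j == 0:
--                 completion_times[j] += job_processing_times[j]
--             else:
--                 completion_times[j] = max(completion_times[j], completion_times[j - 1]) + job_processing_times[j]
--
--     return completion_times[num_machines - 1]
--
-- def BestNeighbor(x, num_machines, processing_times):
--     best = None
--     min_total_processing_time = float('inf')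
--     num_jobs = len(x)
--
--     for i in range(num_jobs - 1):
--         for j in range(i + 1, num_jobs):
--             y = x.copy()
--             y[i], y[j] = y[j], y[i]
--
--             total_processing_time = calculate_total_processing_time(num_machines, num_jobs, processing_times, y)
--             if total_processing_time < min_total_processing_time:
--                 min_total_processing_time = total_processing_time
--                 best = y
--
--     return best
-- ===== SOURCE B (Python) =====
-- def BestNeighbor(x, num_machines, processing_times):
--     n = len(x)
--     if n < 2:
--         return None
--
--     def step(ct, job):
--         row = processing_times[job - 1]
--         out = [ct[0] + row[0]]
--         for j in range(1, num_machines):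
--             out.append(max(ct[j], out[-1]) + row[j])
--         return out
--
--     # prefix[i] = per-machine completion vector after the first i jobs of x
--     prefix = [[0] * num_machines]
--     for job in x:
--         prefix.append(step(prefix[-1], job))
--
--     best = None
--     best_val = None
--     for i in range(n - 1):
--         for j in range(i + 1, n):
--             y = x.copy()
--             y[i], y[j] = y[j], y[i]
--             ct = prefix[i]
--             for job in y[i:]:
--                 ct = step(ct, job)
--             val = ct[num_machines - 1]
--             if best_val is None or val < best_val:
--                 best_val = val
--                 best = y
--     return best
-- ===== Notes on version B (the rewrite author's own statement) =====
-- stated objective: faster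
-- what changed: B precomputes once the per-machine completion-time vector after every prefix of x, then evaluates each pairwise swap by seeding from the saved prefix state at the first swapped position and reprocessing only the suffix, instead of recomputing the whole flowshop makespan from scratch for every pair; pair order and strict '<' tie-breaking are unchanged.
import Mathlib
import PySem

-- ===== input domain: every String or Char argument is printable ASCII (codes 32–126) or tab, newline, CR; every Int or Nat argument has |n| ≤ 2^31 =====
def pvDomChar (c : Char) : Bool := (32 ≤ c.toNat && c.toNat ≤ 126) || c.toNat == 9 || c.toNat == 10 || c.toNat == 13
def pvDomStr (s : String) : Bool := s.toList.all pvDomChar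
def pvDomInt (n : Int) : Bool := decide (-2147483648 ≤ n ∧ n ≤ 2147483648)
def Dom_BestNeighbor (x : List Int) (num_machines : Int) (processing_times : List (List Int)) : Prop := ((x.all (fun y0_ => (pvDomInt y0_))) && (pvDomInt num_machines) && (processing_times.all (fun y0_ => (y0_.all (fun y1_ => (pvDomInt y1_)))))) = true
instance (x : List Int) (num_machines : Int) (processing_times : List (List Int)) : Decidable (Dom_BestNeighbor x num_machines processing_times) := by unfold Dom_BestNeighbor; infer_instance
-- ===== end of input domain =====

-- B replaces A's from-scratch makespan per swap by a once-computed prefix table of per-machine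
-- completion vectors, re-evaluating each swapped permutation only from the first swapped position
-- (constant-factor less work per pair; same pair order, same strict '<' tie-breaking).

-- ===== PORT A =====
-- float('inf') sentinel is ported as Option Int (none = +inf), matching Python's strict '<' test.
def pvCalcA (num_machines : Int) (num_jobs : Int) (processing_times : List (List Int)) (order : List Int) : Int :=
  let ct0 : List Int := List.replicate num_machines.toNat 0
  let ct := order.foldl (fun completion_times job_id =>
    let jpt := PySem.List.pyGetD processing_times (job_id - 1) []
    (PySem.List.pyRange 0 num_machines 1).foldl (fun completion_times j =>
      if j = 0 then
        PySem.List.pySetD completion_times j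
          (PySem.List.pyGetD completion_times j 0 + PySem.List.pyGetD jpt j 0)
      else
        PySem.List.pySetD completion_times j
          (max (PySem.List.pyGetD completion_times j 0) (PySem.List.pyGetD completion_times (j - 1) 0)
            + PySem.List.pyGetD jpt j 0)) completion_times) ct0
  PySem.List.pyGetD ct (num_machines - 1) 0

def BestNeighbor (x : List Int) (num_machines : Int) (processing_times : List (List Int)) : Option (List Int) :=
  let num_jobs : Int := x.length
  let st := (PySem.List.pyRange 0 (num_jobs - 1) 1).foldl (fun st i =>
    (PySem.List.pyRange (i + 1) num_jobs 1).foldl (fun st j =>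
      let y := PySem.List.pySetD (PySem.List.pySetD x i (PySem.List.pyGetD x j 0)) j
        (PySem.List.pyGetD x i 0)
      let total := pvCalcA num_machines num_jobs processing_times y
      match st.2 with
      | none => (some y, some total)
      | some m => if total < m then (some y, some total) else st) st)
    ((none, none) : Option (List Int) × Option Int)
  st.1

-- ===== PORT B =====
def pvStepB (processing_times : List (List Int)) (num_machines : Int) (ct : List Int) (job : Int) : List Int :=
  let row := PySem.List.pyGetD processing_times (job - 1) []
  let out : List Int := [PySem.List.pyGetD ct 0 0 + PySem.List.pyGetD row 0 0]
  (PySem.List.pyRange 1 num_machines 1).foldl (fun out j =>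
    out ++ [max (PySem.List.pyGetD ct j 0) (PySem.List.pyGetD out (-1) 0)
      + PySem.List.pyGetD row j 0]) out

def BestNeighbor_alt (x : List Int) (num_machines : Int) (processing_times : List (List Int)) : Option (List Int) :=
  let n : Int := x.length
  if n < 2 then none else
    let pfx := x.foldl (fun pre job =>
      pre ++ [pvStepB processing_times num_machines (PySem.List.pyGetD pre (-1) []) job])
      [List.replicate num_machines.toNat 0]
    let st := (PySem.List.pyRange 0 (n - 1) 1).foldl (fun st i =>
      (PySem.List.pyRange (i + 1) n 1).foldl (fun st j =>
        let y := PySem.List.pySetD (PySem.List.pySetD x i (PySem.List.pyGetD x j 0)) j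
          (PySem.List.pyGetD x i 0)
        let ct := (PySem.List.slice y (some i) none).foldl
          (pvStepB processing_times num_machines) (PySem.List.pyGetD pfx i [])
        let val := PySem.List.pyGetD ct (num_machines - 1) 0
        match st.2 with
        | none => (some y, some val)
        | some m => if val < m then (some y, some val) else st) st)
      ((none, none) : Option (List Int) × Option Int)
    st.1

-- ===== PRECONDITION & SPEC =====
-- Pre_ is exactly where the Python A returns: with ≥ 2 jobs it needs num_machines ≥ 1, every job id
-- to index processing_times in range (Python negative-index rules), and every referenced row to have
-- at least num_machines entries; on anything else Python A raises IndexError.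
def Pre_BestNeighbor (x : List Int) (num_machines : Int) (processing_times : List (List Int)) : Prop :=
  (x.length : Int) < 2 ∨
    (1 ≤ num_machines ∧ ∀ v ∈ x, PySem.Raise.InRange processing_times.length (v - 1) ∧
      num_machines ≤ ((PySem.List.pyGetD processing_times (v - 1) ([] : List Int)).length : Int))
instance (x : List Int) (num_machines : Int) (processing_times : List (List Int)) : Decidable (Pre_BestNeighbor x num_machines processing_times) := by unfold Pre_BestNeighbor; infer_instance

def pvWitness_BestNeighbor : List Int × Int × List (List Int) := ([1, 2], 1, [[1], [2]])

def Spec_BestNeighbor (x : List Int) (num_machines : Int) (processing_times : List (List Int)) (out : Option (List Int)) : Prop := out = BestNeighbor_alt x num_machines processing_times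
instance (x : List Int) (num_machines : Int) (processing_times : List (List Int)) (out : Option (List Int)) : Decidable (Spec_BestNeighbor x num_machines processing_times out) := by unfold Spec_BestNeighbor; infer_instance

-- ===== CLAIM (what is proved, stated in full; the proofs are below) =====
def Claim_equal_BestNeighbor : Prop := ∀ (x : List Int) (num_machines : Int) (processing_times : List (List Int)), Dom_BestNeighbor x num_machines processing_times → Pre_BestNeighbor x num_machines processing_times → Spec_BestNeighbor x num_machines processing_times (BestNeighbor x num_machines processing_times)

-- ===== LEMMAS AND PROOFS =====

-- reference value: pvVal ct row j = new completion time of machine j after one job with times `row`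
def pvVal (ct row : List Int) : Nat → Int
  | 0 => ct.getD 0 0 + row.getD 0 0
  | k + 1 => max (ct.getD (k + 1) 0) (pvVal ct row k) + row.getD (k + 1) 0

-- reference one-job step: the full new completion vector over m machines
def pvS (processing_times : List (List Int)) (m : Nat) (ct : List Int) (job : Int) : List Int :=
  (List.range m).map (pvVal ct (PySem.List.pyGetD processing_times (job - 1) []))

theorem pvS_length (pt : List (List Int)) (m : Nat) (ct : List Int) (job : Int) :
    (pvS pt m ct job).length = m := by simp [pvS]

-- A's in-place machine loop: after the first k iterations the state is the k new values
-- followed by the untouched old tail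
theorem stepA_aux (ct row : List Int) (k : Nat) (hk : k ≤ ct.length) :
    (PySem.List.pyRange 0 (k : Int) 1).foldl (fun completion_times j =>
      if j = 0 then
        PySem.List.pySetD completion_times j
          (PySem.List.pyGetD completion_times j 0 + PySem.List.pyGetD row j 0)
      else
        PySem.List.pySetD completion_times j
          (max (PySem.List.pyGetD completion_times j 0) (PySem.List.pyGetD completion_times (j - 1) 0)
            + PySem.List.pyGetD row j 0)) ct
    = (List.range k).map (pvVal ct row) ++ ct.drop k := by
  induction k with
  | zero => simp
  | succ k ih =>
    have hk' : k ≤ ct.length := Nat.le_of_succ_le hk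
    have hlt : k < ct.length := hk
    rw [show ((k+1 : Nat) : Int) = (k : Int) + 1 by push_cast; ring,
        PySem.List.pyRange_one_succ_right (by positivity), List.foldl_append, ih hk']
    simp only [List.foldl_cons, List.foldl_nil]
    have hdk : ct.drop k = ct[k] :: ct.drop (k+1) := List.drop_eq_getElem_cons hlt
    by_cases h0 : (k : Int) = 0
    · have hk0 : k = 0 := by exact_mod_cast h0
      subst hk0
      simp only [if_pos h0, List.range_zero, List.map_nil, List.nil_append, List.drop_zero]
      rw [show ((0:Nat):Int) = ((0:Nat):Int) from rfl]
      rw [PySem.List.pySetD_natCast ct 0, PySem.List.pyGetD_natCast ct 0, PySem.List.pyGetD_natCast row 0]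
      cases ct with
      | nil => simp at hlt
      | cons a l => simp [List.range_succ, pvVal]
    · have hkpos : 0 < k := by
        rcases Nat.eq_zero_or_pos k with h | h
        · exact absurd (by simp [h]) h0
        · exact h
      simp only [if_neg h0]
      have hread1 : PySem.List.pyGetD ((List.range k).map (pvVal ct row) ++ ct.drop k) (k : Int) 0
          = ct[k] := by
        rw [PySem.List.pyGetD_natCast, hdk, List.getD_eq_getElem?_getD,
            List.getElem?_append_right (by simp)]
        simp [List.getElem?_eq_getElem hlt]
      have hread2 : PySem.List.pyGetD ((List.range k).map (pvVal ct row) ++ ct.drop k) ((k : Int) - 1) 0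
          = pvVal ct row (k-1) := by
        rw [show (k : Int) - 1 = ((k-1 : Nat) : Int) by omega, PySem.List.pyGetD_natCast,
            List.getD_eq_getElem?_getD, List.getElem?_append_left (by simp; omega),
            List.getElem?_map, List.getElem?_range (show k-1 < k by omega)]
        simp
      rw [hread1, hread2, PySem.List.pyGetD_natCast row k, PySem.List.pySetD_natCast]
      rw [hdk, List.set_append_right _ _ (by simp)]
      simp only [List.length_map, List.length_range, Nat.sub_self, List.set_cons_zero]
      have hv : pvVal ct row k = max ct[k] (pvVal ct row (k-1)) + row.getD k 0 := by
        cases k with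
        | zero => omega
        | succ k' =>
          simp only [pvVal, Nat.add_sub_cancel]
          rw [List.getD_eq_getElem?_getD, List.getElem?_eq_getElem hlt]
          simp
      rw [List.range_succ, List.map_append, ← hv]
      simp

-- B's appending machine loop builds the same reference vector
theorem stepB_aux0 (ct row : List Int) (k : Nat) (h1 : 1 ≤ k) :
    (PySem.List.pyRange 1 (k : Int) 1).foldl (fun out j =>
      out ++ [max (PySem.List.pyGetD ct j 0) (PySem.List.pyGetD out (-1) 0)
        + PySem.List.pyGetD row j 0]) [pvVal ct row 0]
    = (List.range k).map (pvVal ct row) := by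
  induction k with
  | zero => omega
  | succ k ih =>
    rcases Nat.eq_zero_or_pos k with hk0 | hkpos
    · subst hk0
      simp [PySem.List.pyRange, List.range_succ]
    · rw [show ((k+1 : Nat) : Int) = (k : Int) + 1 by push_cast; ring,
          PySem.List.pyRange_one_succ_right (by exact_mod_cast hkpos), List.foldl_append, ih hkpos]
      simp only [List.foldl_cons, List.foldl_nil]
      have hne : (List.range k).map (pvVal ct row) ≠ [] := by simp; omega
      rw [PySem.List.pyGetD_neg_one _ _ hne, PySem.List.pyGetD_natCast ct k, PySem.List.pyGetD_natCast row k]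
      have hlast : ((List.range k).map (pvVal ct row)).getLast hne = pvVal ct row (k-1) := by
        rw [List.getLast_eq_getElem]
        simp only [List.length_map, List.length_range, List.getElem_map, List.getElem_range]
      rw [hlast, List.range_succ, List.map_append]
      congr 1
      cases k with
      | zero => omega
      | succ k' => simp [pvVal]

theorem stepB_funext (pt : List (List Int)) (nm : Int) (hm : 1 ≤ nm) :
    pvStepB pt nm = pvS pt nm.toNat := by
  funext ct job
  have hnm : nm = ((nm.toNat : Nat) : Int) := by omega
  simp only [pvStepB, pvS, PySem.List.pyGetD_zero]
  rw [show PySem.List.pyRange 1 nm 1 = PySem.List.pyRange 1 ((nm.toNat : Nat) : Int) 1 by rw [← hnm]]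
  exact stepB_aux0 ct _ nm.toNat (by omega)

theorem foldA_eq (nm : Int) (hm : 1 ≤ nm) (pt : List (List Int)) (order : List Int)
    (ct : List Int) (hlen : ct.length = nm.toNat) :
    order.foldl (fun completion_times job_id =>
      let jpt := PySem.List.pyGetD pt (job_id - 1) []
      (PySem.List.pyRange 0 nm 1).foldl (fun completion_times j =>
        if j = 0 then
          PySem.List.pySetD completion_times j
            (PySem.List.pyGetD completion_times j 0 + PySem.List.pyGetD jpt j 0)
        else
          PySem.List.pySetD completion_times j
            (max (PySem.List.pyGetD completion_times j 0) (PySem.List.pyGetD completion_times (j - 1) 0)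
              + PySem.List.pyGetD jpt j 0)) completion_times) ct
    = order.foldl (pvS pt nm.toNat) ct := by
  induction order generalizing ct with
  | nil => rfl
  | cons job rest ih =>
    simp only [List.foldl_cons]
    have hstep : (PySem.List.pyRange 0 nm 1).foldl (fun completion_times j =>
        if j = 0 then
          PySem.List.pySetD completion_times j
            (PySem.List.pyGetD completion_times j 0 + PySem.List.pyGetD (PySem.List.pyGetD pt (job - 1) []) j 0)
        else
          PySem.List.pySetD completion_times j
            (max (PySem.List.pyGetD completion_times j 0) (PySem.List.pyGetD completion_times (j - 1) 0)
              + PySem.List.pyGetD (PySem.List.pyGetD pt (job - 1) []) j 0)) ct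
        = pvS pt nm.toNat ct job := by
      rw [show PySem.List.pyRange 0 nm 1 = PySem.List.pyRange 0 ((nm.toNat : Nat) : Int) 1 by
            congr 1; omega,
          stepA_aux ct _ nm.toNat (by omega)]
      simp [pvS, List.drop_of_length_le, hlen]
    rw [hstep, ih _ (pvS_length pt nm.toNat ct job)]

theorem calcA_eq (nm : Int) (hm : 1 ≤ nm) (nj : Int) (pt : List (List Int)) (order : List Int) :
    pvCalcA nm nj pt order
      = PySem.List.pyGetD (order.foldl (pvS pt nm.toNat) (List.replicate nm.toNat 0)) (nm - 1) 0 := by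
  simp only [pvCalcA]
  rw [foldA_eq nm hm pt order _ (by simp)]

-- B's prefix table is the list of partial folds of the reference step
theorem prefix_eq (pt : List (List Int)) (nm : Int) (hm : 1 ≤ nm) (x : List Int) :
    x.foldl (fun pre job =>
      pre ++ [pvStepB pt nm (PySem.List.pyGetD pre (-1) []) job])
      [List.replicate nm.toNat 0]
    = (List.range (x.length + 1)).map
        (fun k => (x.take k).foldl (pvS pt nm.toNat) (List.replicate nm.toNat 0)) := by
  induction x using List.reverseRecOn with
  | nil => simp
  | append_singleton xs a ih =>
    rw [List.foldl_append, List.foldl_cons, List.foldl_nil, ih]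
    have hne : (List.range (xs.length + 1)).map
        (fun k => (xs.take k).foldl (pvS pt nm.toNat) (List.replicate nm.toNat 0)) ≠ [] := by simp
    rw [PySem.List.pyGetD_neg_one _ _ hne, stepB_funext pt nm hm]
    have hlast : ((List.range (xs.length + 1)).map
        (fun k => (xs.take k).foldl (pvS pt nm.toNat) (List.replicate nm.toNat 0))).getLast hne
        = xs.foldl (pvS pt nm.toNat) (List.replicate nm.toNat 0) := by
      rw [List.getLast_eq_getElem]
      simp
    rw [hlast]
    have hlen : (xs ++ [a]).length + 1 = (xs.length + 1) + 1 := by simp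
    rw [hlen]
    conv_rhs => rw [List.range_succ, List.map_append]
    congr 1
    · apply List.map_congr_left
      intro k hk
      simp only [List.mem_range] at hk
      rw [List.take_append_of_le_length (by omega)]
    · simp [List.take_of_length_le, List.foldl_append]

-- one pair (i, j): A's from-scratch makespan equals B's prefix-seeded suffix makespan
theorem pair_eq (x : List Int) (nm : Int) (pt : List (List Int)) (hm : 1 ≤ nm)
    (i j : Int) (hi0 : 0 ≤ i) (hij : i + 1 ≤ j) (hj : j < (x.length : Int)) :
    pvCalcA nm (x.length : Int) pt
        (PySem.List.pySetD (PySem.List.pySetD x i (PySem.List.pyGetD x j 0)) j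
          (PySem.List.pyGetD x i 0))
      = PySem.List.pyGetD
          ((PySem.List.slice
              (PySem.List.pySetD (PySem.List.pySetD x i (PySem.List.pyGetD x j 0)) j
                (PySem.List.pyGetD x i 0)) (some i) none).foldl
            (pvStepB pt nm)
            (PySem.List.pyGetD
              (x.foldl (fun pre job =>
                pre ++ [pvStepB pt nm (PySem.List.pyGetD pre (-1) []) job])
                [List.replicate nm.toNat 0]) i []))
          (nm - 1) 0 := by
  obtain ⟨ki, rfl⟩ : ∃ k : Nat, i = (k : Int) := ⟨i.toNat, by omega⟩
  obtain ⟨kj, rfl⟩ : ∃ k : Nat, j = (k : Int) := ⟨j.toNat, by omega⟩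
  have hkij : ki < kj := by exact_mod_cast hij
  have hkj : kj < x.length := by exact_mod_cast hj
  set y := PySem.List.pySetD (PySem.List.pySetD x (ki : Int) (PySem.List.pyGetD x (kj : Int) 0)) (kj : Int)
    (PySem.List.pyGetD x (ki : Int) 0) with hy
  have hyset : y = (x.set ki (x.getD kj 0)).set kj (x.getD ki 0) := by
    simp [hy]
  have htake : y.take ki = x.take ki := by
    rw [hyset, List.take_set_of_le (le_of_lt hkij), List.take_set_of_le (le_refl ki)]
  rw [calcA_eq nm hm, prefix_eq pt nm hm x, stepB_funext pt nm hm]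
  rw [PySem.List.pyGetD_natCast, PySem.List.getD_map_range _ _ _ _ (by omega)]
  rw [PySem.List.slice_from _ (by positivity), Int.toNat_natCast]
  rw [← htake, ← List.foldl_append, List.take_append_drop]

theorem pvMain (x : List Int) (nm : Int) (pt : List (List Int))
    (h : (x.length : Int) < 2 ∨ 1 ≤ nm) :
    BestNeighbor x nm pt = BestNeighbor_alt x nm pt := by
  by_cases hn : (x.length : Int) < 2
  · simp only [BestNeighbor, BestNeighbor_alt, if_pos hn]
    have h0 : ((x.length : Int) - 1).toNat = 0 := by omega
    have hr : PySem.List.pyRange 0 ((x.length : Int) - 1) 1 = [] := by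
      simp [PySem.List.pyRange_one, h0]
    rw [hr]
    rfl
  · have hm : 1 ≤ nm := h.resolve_left hn
    simp only [BestNeighbor, BestNeighbor_alt, if_neg hn]
    congr 1
    apply PySem.List.foldl_congr_mem
    intro st i hi
    apply PySem.List.foldl_congr_mem
    intro st' j hj
    rw [PySem.List.mem_pyRange_one] at hi hj
    have hp := pair_eq x nm pt hm i j hi.1 hj.1 hj.2
    simp only [hp]

-- ===== VERDICT (by name: the statement is the Claim_ definition above) =====
theorem BestNeighbor_spec : Claim_equal_BestNeighbor := by
  intro x nm pt _hdom hpre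
  show BestNeighbor x nm pt = BestNeighbor_alt x nm pt
  apply pvMain
  rcases hpre with h | h
  · exact Or.inl h
  · exact Or.inr h.1
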